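-- pv_equiv track=rewrite | github.com/nellaG/ps | baekjoon/1759.py | check
-- ===== SOURCE A (Python) =====
-- def check(pw):
--     ja = 0
--     mo = 0
--     for letter in pw:
--         if letter in ['a', 'e', 'i', 'o', 'u']:
--             mo += 1
--         else:
--             ja += 1
--     return (mo >= 1 and ja >= 2)
-- ===== SOURCE B (Python) =====
-- def check(pw):
--     mo = sum(pw.count(v) for v in "aeiou")
--     return mo >= 1 and len(pw) - mo >= 2
-- ===== Notes on version B (the rewrite author's own statement) =====
-- stated objective: faster
-- what changed: B inverts the traversal: instead of A's per-character Python loop with two accumulators, it iterates over the five-letter vowel alphabet summing pw.count(v) per vowel (a C-level scan) and derives the consonant count arithmetically as len(pw) - vowels.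
import Mathlib
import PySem

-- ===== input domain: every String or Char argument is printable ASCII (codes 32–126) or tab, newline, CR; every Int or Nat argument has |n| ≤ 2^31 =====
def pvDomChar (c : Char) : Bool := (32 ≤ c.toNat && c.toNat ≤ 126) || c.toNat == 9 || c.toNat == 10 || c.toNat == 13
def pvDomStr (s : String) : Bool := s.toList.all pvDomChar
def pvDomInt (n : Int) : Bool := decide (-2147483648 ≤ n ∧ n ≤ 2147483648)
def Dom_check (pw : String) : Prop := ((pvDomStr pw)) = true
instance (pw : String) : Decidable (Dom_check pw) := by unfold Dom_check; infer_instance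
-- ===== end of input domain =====

-- B inverts the traversal: it sums pw.count(v) over the five vowels and derives
-- consonants as len(pw) - vowels, instead of A's per-character two-counter loop.

def pvIsVowel (c : Char) : Bool := c ∈ ['a', 'e', 'i', 'o', 'u']

-- ===== PORT A =====
-- for letter in pw: if vowel then mo += 1 else ja += 1; return mo >= 1 and ja >= 2
def check (pw : String) : Bool :=
  let st := pw.toList.foldl
    (fun (p : Int × Int) letter =>
      if pvIsVowel letter then (p.1, p.2 + 1) else (p.1 + 1, p.2))
    (0, 0)
  decide (st.2 ≥ 1) && decide (st.1 ≥ 2)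

-- ===== PORT B =====
-- mo = sum(pw.count(v) for v in "aeiou"); return mo >= 1 and len(pw) - mo >= 2
def check_alt (pw : String) : Bool :=
  let mo : Int := ("aeiou".toList).foldl
    (fun acc v => acc + (PySem.Str.count pw (String.ofList [v]) : Int)) 0
  decide (mo ≥ 1) && decide (PySem.Str.len pw - mo ≥ 2)

-- ===== PRECONDITION & SPEC =====
def Spec_check (pw : String) (out : Bool) : Prop := out = check_alt pw
instance (pw : String) (out : Bool) : Decidable (Spec_check pw out) := by unfold Spec_check; infer_instance

-- ===== CLAIM (what is proved, stated in full; the proofs are below) =====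
def Claim_equal_check : Prop := ∀ (pw : String), Dom_check pw → Spec_check pw (check pw)

-- ===== LEMMAS AND PROOFS =====

-- Chars.count with a single-character needle is List.count
theorem count_go_single (c : Char) : ∀ (l : List Char) (acc : Nat),
    PySem.Chars.count.go [c] l.length l acc = acc + List.count c l := by
  intro l
  induction l with
  | nil => intro acc; simp [PySem.Chars.count.go]
  | cons d t ih =>
    intro acc
    by_cases h : c = d
    · subst h
      simp only [List.length_cons, PySem.Chars.count.go, List.isPrefixOf, BEq.rfl,
        Bool.true_and, if_true, List.length_nil, List.drop, ih, List.count_cons_self]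
      omega
    · have hb : (c == d) = false := by simp [h]
      have hb2 : (d == c) = false := beq_eq_false_iff_ne.mpr (fun he => h he.symm)
      simp [PySem.Chars.count.go, List.isPrefixOf, hb, ih, List.count_cons, hb2]

theorem count_single (l : List Char) (c : Char) :
    PySem.Chars.count l [c] = List.count c l := by
  simp [PySem.Chars.count, count_go_single]

-- one character contributes 1 to the five-vowel count-sum iff it is a vowel
theorem one_char_sum (d : Char) :
    ((if d = 'a' then 1 else 0) + (if d = 'e' then 1 else 0) + (if d = 'i' then 1 else 0)
      + (if d = 'o' then 1 else 0) + (if d = 'u' then 1 else 0) : Int)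
    = (if pvIsVowel d then 1 else 0) := by
  by_cases h1 : d = 'a' <;> by_cases h2 : d = 'e' <;> by_cases h3 : d = 'i' <;>
    by_cases h4 : d = 'o' <;> by_cases h5 : d = 'u' <;>
    simp_all [pvIsVowel]

-- sum of the five per-vowel counts = number of vowel positions
theorem sum_five_counts (l : List Char) :
    ((List.count 'a' l : Int) + List.count 'e' l + List.count 'i' l + List.count 'o' l
        + List.count 'u' l)
      = (l.countP pvIsVowel : Int) := by
  induction l with
  | nil => simp
  | cons d t ih =>
    simp only [List.count_cons, List.countP_cons]
    push_cast
    rw [show ∀ a b c e f : Int,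
        ((List.count 'a' t : Int) + a) + ((List.count 'e' t : Int) + b)
          + ((List.count 'i' t : Int) + c) + ((List.count 'o' t : Int) + e)
          + ((List.count 'u' t : Int) + f)
        = ((List.count 'a' t : Int) + List.count 'e' t + List.count 'i' t + List.count 'o' t
            + List.count 'u' t) + (a + b + c + e + f) from by intro a b c e f; ring]
    rw [ih]
    have h := one_char_sum d
    simp only [beq_iff_eq]
    by_cases hv : pvIsVowel d = true <;> simp_all

-- A's two-counter fold in closed form
theorem check_fold_inv (l : List Char) (ja mo : Int) :
    l.foldl (fun (p : Int × Int) letter =>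
        if pvIsVowel letter then (p.1, p.2 + 1) else (p.1 + 1, p.2)) (ja, mo)
      = (ja + ((l.length : Int) - (l.countP pvIsVowel : Int)),
         mo + (l.countP pvIsVowel : Int)) := by
  induction l generalizing ja mo with
  | nil => simp
  | cons c t ih =>
    by_cases h : pvIsVowel c = true
    · simp only [List.foldl_cons, h, if_true, ih, List.length_cons, List.countP_cons,
        Prod.mk.injEq]
      push_cast
      constructor <;> ring
    · simp only [List.foldl_cons, h, if_false, Bool.false_eq_true, ih, List.length_cons,
        List.countP_cons, Prod.mk.injEq]
      push_cast
      constructor <;> ring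

-- ===== VERDICT (by name: the statement is the Claim_ definition above) =====
theorem check_spec : Claim_equal_check := by
  intro pw _
  unfold Spec_check check check_alt
  rw [check_fold_inv]
  have hlist : "aeiou".toList = ['a', 'e', 'i', 'o', 'u'] := rfl
  simp only [hlist, List.foldl_cons, List.foldl_nil, PySem.Str.count_eq]
  have hc : ∀ c : Char, PySem.Chars.count pw.toList (String.ofList [c]).toList
      = List.count c pw.toList := by
    intro c
    rw [show (String.ofList [c]).toList = [c] by simp, count_single]
  simp only [hc, PySem.Str.len_eq]
  have hs := sum_five_counts pw.toList
  congr 1 <;> rw [decide_eq_decide] <;> omega
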